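-- pv_equiv track=rewrite | github.com/AndreyIh/Solved_from_chekio | Twilio SendGrid/stressful_subject.py | is_stressful
-- ===== SOURCE A (Python) =====
-- def is_stressful(subj):
--     """
--         recognize stressful subject
--     """
--     a, x = '', 0
--
--     if subj[len(subj)-3:len(subj)] == '!!!':
--
--         return True
--     elif subj.isupper():
--         return True
--     subj = subj.lower()
--
--     for i in subj:
--         if i.isalpha():
--             a += i
--             if len(a) > 1 and a[len(a)-1] == a[len(a)-2]:
--                 a = a[:len(a)-1]
--
--     if a.find('help') != -1 or a.find('asap') != -1 or a.find('urgent') != -1: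
--         return True
--     else:
--         return False
-- ===== SOURCE B (Python) =====
-- def _match_runs(chars, i, word):
--     """Match word as a sequence of non-empty letter runs starting exactly at index i."""
--     n = len(chars)
--     for letter in word:
--         if i >= n or chars[i] != letter:
--             return False
--         while i < n and chars[i] == letter:
--             i += 1
--     return True
--
--
-- def is_stressful(subj):
--     """recognize stressful subject"""
--     if subj.endswith('!!!') or subj.isupper():
--         return True
--     filtered = [c for c in subj.lower() if c.isalpha()]
--     return any(_match_runs(filtered, i, w)
--                for i in range(len(filtered) + 1)
--                for w in ('help', 'asap', 'urgent'))
-- ===== Notes on version B (the rewrite author's own statement) =====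
-- stated objective: alternative
-- what changed: Instead of building the duplicate-collapsed letter string character by character (append then conditionally chop the last char) and substring-searching it with find(), B filters the lowered subject to its letters once and matches each keyword directly as a sequence of non-empty letter runs (h+e+l+p+ style) at every start position.
import Mathlib
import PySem

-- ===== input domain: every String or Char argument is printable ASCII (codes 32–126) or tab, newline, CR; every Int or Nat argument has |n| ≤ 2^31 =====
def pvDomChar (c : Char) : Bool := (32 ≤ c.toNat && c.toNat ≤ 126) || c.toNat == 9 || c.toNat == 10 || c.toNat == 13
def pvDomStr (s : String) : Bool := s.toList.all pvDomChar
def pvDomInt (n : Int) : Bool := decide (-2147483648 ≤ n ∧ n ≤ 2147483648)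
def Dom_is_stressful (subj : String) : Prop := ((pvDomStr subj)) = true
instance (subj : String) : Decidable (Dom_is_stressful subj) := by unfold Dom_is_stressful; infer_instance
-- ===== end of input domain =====

-- B replaces A's collapse-duplicates-then-substring scan by direct run-pattern matching
-- of the keywords over the alpha-filtered lowered string (objective: alternative).

-- shared helper: str.isupper() — at least one uppercase and no lowercase letter; exact on the ASCII domain
def pyStrIsupper (s : String) : Bool :=
  s.toList.any PySem.Chars.isupper && !(s.toList.any PySem.Chars.islower)

-- ===== PORT A =====
def is_stressful (subj : String) : Bool :=
  -- if subj[len(subj)-3:len(subj)] == '!!!': return True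
  if PySem.Str.slice subj (some ((PySem.Str.len subj : Int) - 3)) (some ((PySem.Str.len subj : Int))) == "!!!" then
    true
  -- elif subj.isupper(): return True
  else if pyStrIsupper subj then
    true
  else
    -- subj = subj.lower(); for i in subj: …  (a built as a list of code points)
    let a : List Char :=
      (PySem.Str.lower subj).toList.foldl (fun a i =>
        if PySem.Chars.isalpha i then
          let a' := a ++ [i]
          if a'.length > 1 &&
             (PySem.List.pyGet? a' ((a'.length : Int) - 1) == PySem.List.pyGet? a' ((a'.length : Int) - 2)) then
            PySem.List.slice a' none (some ((a'.length : Int) - 1))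
          else a'
        else a) []
    -- if a.find('help') != -1 or a.find('asap') != -1 or a.find('urgent') != -1: …
    if PySem.Chars.find a "help".toList != -1 || PySem.Chars.find a "asap".toList != -1 ||
       PySem.Chars.find a "urgent".toList != -1 then
      true
    else
      false

-- ===== PORT B =====
-- while i < n and chars[i] == letter: i += 1   (advance past the current run of `letter`)
def skipRun (c : Char) : List Char → List Char
  | [] => []
  | x :: xs => if x == c then skipRun c xs else x :: xs

-- _match_runs: each letter of the word must start a non-empty run at the current position
def matchRuns : List Char → List Char → Bool
  | _, [] => true
  | [], _ :: _ => false
  | x :: xs, c :: ws => if x != c then false else matchRuns (skipRun c xs) ws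

def is_stressful_alt (subj : String) : Bool :=
  if PySem.Str.endswith subj "!!!" || pyStrIsupper subj then
    true
  else
    let filtered := (PySem.Str.lower subj).toList.filter (fun c => PySem.Chars.isalpha c)
    (List.range (filtered.length + 1)).any (fun i =>
      ["help", "asap", "urgent"].any (fun w => matchRuns (filtered.drop i) w.toList))

-- ===== PRECONDITION & SPEC =====
def Spec_is_stressful (subj : String) (out : Bool) : Prop := out = is_stressful_alt subj
instance (subj : String) (out : Bool) : Decidable (Spec_is_stressful subj out) := by unfold Spec_is_stressful; infer_instance

-- ===== CLAIM (what is proved, stated in full; the proofs are below) =====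
def Claim_equal_is_stressful : Prop := ∀ (subj : String), Dom_is_stressful subj → Spec_is_stressful subj (is_stressful subj)

-- ===== LEMMAS AND PROOFS =====

lemma skipRun_length_le (c : Char) (t : List Char) : (skipRun c t).length ≤ t.length := by
  induction t with
  | nil => simp [skipRun]
  | cons x xs ih =>
      simp only [skipRun]; split
      · exact ih.trans (Nat.le_succ _)
      · simp

lemma skipRun_suffix (c : Char) (t : List Char) : skipRun c t <:+ t := by
  induction t with
  | nil => simp [skipRun]
  | cons x xs ih =>
      simp only [skipRun]; split
      · exact ih.trans (List.suffix_cons x xs)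
      · exact List.suffix_refl _

-- collapse of consecutive duplicates (what A's loop computes on the filtered letters)
def col : List Char → List Char
  | [] => []
  | c :: t => c :: col (skipRun c t)
termination_by s => s.length
decreasing_by
  exact Nat.lt_succ_of_le (skipRun_length_le c t)

-- A's loop with the accumulator abstracted to its last character
def colA (o : Option Char) : List Char → List Char
  | [] => []
  | c :: t => if o == some c then colA o t else c :: colA (some c) t

lemma colA_some_eq (t : List Char) : ∀ c, colA (some c) t = col (skipRun c t) := by
  induction t with
  | nil => intro c; simp [colA, skipRun, col]
  | cons x xs ih =>
      intro c
      by_cases h : x = c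
      · subst h; simp [colA, skipRun, ih]
      · have h1 : (x == c) = false := by simp [h]
        have h2 : ((some c : Option Char) == some x) = false := by
          simp only [beq_eq_false_iff_ne, ne_eq, Option.some.injEq]
          exact fun e => h e.symm
        simp [colA, h2, skipRun, h1, col, ih x]

lemma colA_none_eq (s : List Char) : colA none s = col s := by
  cases s with
  | nil => simp [colA, col]
  | cons c t => simp [colA, col, colA_some_eq]

-- A's loop body (on a letter) is the "append unless it repeats the last letter" step
lemma bodyA_eq (a : List Char) (c : Char) :
    (if (a ++ [c]).length > 1 &&
        (PySem.List.pyGet? (a ++ [c]) (((a ++ [c]).length : Int) - 1) ==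
         PySem.List.pyGet? (a ++ [c]) (((a ++ [c]).length : Int) - 2)) then
       PySem.List.slice (a ++ [c]) none (some (((a ++ [c]).length : Int) - 1))
     else a ++ [c])
    = if a.getLast? == some c then a else a ++ [c] := by
  cases a with
  | nil => simp [PySem.List.pyGet?]
  | cons b bs =>
    have hlen : (b :: bs ++ [c]).length = bs.length + 2 := by simp
    have h1 : ((b :: bs ++ [c]).length : Int) - 1 = ((bs.length + 1 : Nat) : Int) := by
      rw [hlen]; push_cast; ring
    have h2 : ((b :: bs ++ [c]).length : Int) - 2 = ((bs.length : Nat) : Int) := by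
      rw [hlen]; push_cast; ring
    rw [h1, h2, PySem.List.pyGet?_natCast, PySem.List.pyGet?_natCast, PySem.List.slice_to_natCast]
    have e1 : (b :: bs ++ [c])[bs.length + 1]? = some c := by
      rw [List.getElem?_append_right (by simp)]
      simp
    have e2 : (b :: bs ++ [c])[bs.length]? = (b :: bs).getLast? := by
      rw [List.getElem?_append_left (by simp)]
      rw [List.getLast?_eq_getElem?]
      simp
    have e3 : (b :: bs ++ [c]).take (bs.length + 1) = b :: bs := by
      have : bs.length + 1 = (b :: bs).length := by simp
      rw [this, List.take_left]
    rw [e1, e2, e3, hlen]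
    by_cases h : (b :: bs).getLast? = some c
    · simp [h]
    · have hne : ¬ some c = (b :: bs).getLast? := fun e => h e.symm
      simp [h, hne]

-- the whole loop computes colA of the accumulator's last character
lemma foldl_step_eq (cs : List Char) : ∀ (a : List Char),
    cs.foldl (fun a c => if a.getLast? == some c then a else a ++ [c]) a = a ++ colA a.getLast? cs := by
  induction cs with
  | nil => intro a; simp [colA]
  | cons c t ih =>
    intro a
    by_cases h : a.getLast? = some c
    · have hb : (a.getLast? == some c) = true := by simp [h]
      rw [List.foldl_cons, if_pos hb, ih a]
      simp [colA, hb]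
    · have hb : (a.getLast? == some c) = false := by simp [h]
      rw [List.foldl_cons, if_neg (by simp [hb]), ih (a ++ [c])]
      simp [colA, hb]

-- A's whole accumulation loop computes the duplicate collapse of the filtered letters
lemma aLoop_eq (cs : List Char) :
    cs.foldl (fun a i =>
      if PySem.Chars.isalpha i then
        let a' := a ++ [i]
        if a'.length > 1 &&
           (PySem.List.pyGet? a' ((a'.length : Int) - 1) == PySem.List.pyGet? a' ((a'.length : Int) - 2)) then
          PySem.List.slice a' none (some ((a'.length : Int) - 1))
        else a'
      else a) []
    = col (cs.filter (fun c => PySem.Chars.isalpha c)) := by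
  have hfun : (fun (a : List Char) (i : Char) =>
      if PySem.Chars.isalpha i then
        let a' := a ++ [i]
        if a'.length > 1 &&
           (PySem.List.pyGet? a' ((a'.length : Int) - 1) == PySem.List.pyGet? a' ((a'.length : Int) - 2)) then
          PySem.List.slice a' none (some ((a'.length : Int) - 1))
        else a'
      else a)
      = (fun (a : List Char) (i : Char) =>
          if PySem.Chars.isalpha i then (if a.getLast? == some i then a else a ++ [i]) else a) := by
    funext a i
    by_cases h : PySem.Chars.isalpha i
    · simp only [h, if_true]
      exact bodyA_eq a i
    · simp [h]
  rw [hfun, ← List.foldl_filter, foldl_step_eq]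
  simp [colA_none_eq]

lemma matchRuns_iff (w : List Char) : ∀ s : List Char, matchRuns s w = true ↔ w <+: col s := by
  induction w with
  | nil => intro s; simp [matchRuns]
  | cons c ws ih =>
    intro s
    cases s with
    | nil => simp [matchRuns, col]
    | cons x xs =>
      by_cases h : x = c
      · subst h
        rw [col]
        simp [matchRuns, ih, List.cons_prefix_cons]
      · rw [col]
        constructor
        · intro hm
          simp [matchRuns, h] at hm
        · intro hp
          exact absurd (List.cons_prefix_cons.1 hp).1.symm h

lemma col_cons_suffix (c : Char) (t : List Char) : col t <:+ col (c :: t) := by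
  cases t with
  | nil => simp [col]
  | cons x xs =>
    by_cases h : x = c
    · subst h
      rw [col, col]
      have : skipRun x (x :: xs) = skipRun x xs := by simp [skipRun]
      rw [this]
    · have hs : skipRun c (x :: xs) = x :: xs := by simp [skipRun, h]
      conv_rhs => rw [col]
      rw [hs]
      exact List.suffix_cons c _

lemma col_suffix_mono {t s : List Char} (h : t <:+ s) : col t <:+ col s := by
  obtain ⟨r, rfl⟩ := h
  induction r with
  | nil => simp
  | cons y r ih => exact ih.trans (col_cons_suffix y (r ++ t))

lemma suffix_col_exists {s u : List Char} (h : u <:+ col s) : ∃ t, t <:+ s ∧ u = col t := by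
  induction s using col.induct generalizing u with
  | case1 =>
    have hu : u = [] := by simpa [col] using h
    exact ⟨[], List.nil_suffix, by simp [col, hu]⟩
  | case2 c t ih =>
    rw [col] at h
    rcases List.suffix_cons_iff.1 h with h1 | h2
    · exact ⟨c :: t, List.suffix_refl _, by rw [col, h1]⟩
    · obtain ⟨t', ht', rfl⟩ := ih h2
      exact ⟨t', ht'.trans ((skipRun_suffix c t).trans (List.suffix_cons c t)), rfl⟩

lemma infix_col_iff (w s : List Char) :
    w <:+: col s ↔ ∃ i ≤ s.length, matchRuns (s.drop i) w = true := by
  rw [List.infix_iff_prefix_suffix]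
  constructor
  · rintro ⟨u, hpre, hsuf⟩
    obtain ⟨t, hts, rfl⟩ := suffix_col_exists hsuf
    obtain ⟨r, rfl⟩ := hts
    refine ⟨r.length, by simp, ?_⟩
    rw [List.drop_left]
    exact (matchRuns_iff w t).2 hpre
  · rintro ⟨i, hi, hm⟩
    exact ⟨col (s.drop i), (matchRuns_iff w _).1 hm, col_suffix_mono (List.drop_suffix i s)⟩

lemma guard_eq (subj : String) :
    (PySem.Str.slice subj (some ((PySem.Str.len subj : Int) - 3)) (some ((PySem.Str.len subj : Int))) == "!!!")
    = PySem.Str.endswith subj "!!!" := by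
  have key : PySem.List.slice subj.toList (some ((subj.toList.length : Int) - 3)) (some ((subj.toList.length : Int)))
      = "!!!".toList ↔ "!!!".toList <:+ subj.toList := by
    by_cases h3 : 3 ≤ subj.toList.length
    · rw [show ((subj.toList.length : Int) - 3) = ((subj.toList.length - 3 : Nat) : Int) from (Int.natCast_sub h3).symm]
      rw [PySem.List.slice_natCast]
      rw [show subj.toList.length - (subj.toList.length - 3) = 3 from by omega]
      rw [List.take_of_length_le (by simp; omega)]
      rw [List.suffix_iff_eq_drop]
      rw [show ("!!!".toList).length = 3 from rfl]
      exact ⟨fun h => h.symm, fun h => h.symm⟩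
    · constructor
      · intro h
        have hl := congrArg List.length h
        rw [PySem.List.length_slice] at hl
        have hc1 := PySem.List.clampIdx_le subj.toList.length ((subj.toList.length : Int))
        have hc2 := PySem.List.clampIdx_le subj.toList.length ((subj.toList.length : Int) - 3)
        rw [show ("!!!".toList).length = 3 from rfl] at hl
        omega
      · intro h
        have := h.length_le
        rw [show ("!!!".toList).length = 3 from rfl] at this
        omega
  rw [Bool.eq_iff_iff, beq_iff_eq, PySem.Str.endswith_eq, PySem.Chars.endswith_iff]
  rw [← String.toList_inj]
  simp only [pysem]
  exact key

-- the non-guard branches agree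
lemma branch_eq (cs : List Char) :
    (if PySem.Chars.find (col (cs.filter (fun c => PySem.Chars.isalpha c))) "help".toList != -1 ||
        PySem.Chars.find (col (cs.filter (fun c => PySem.Chars.isalpha c))) "asap".toList != -1 ||
        PySem.Chars.find (col (cs.filter (fun c => PySem.Chars.isalpha c))) "urgent".toList != -1 then
       true
     else false)
    = ((List.range ((cs.filter (fun c => PySem.Chars.isalpha c)).length + 1)).any (fun i =>
        ["help", "asap", "urgent"].any (fun w =>
          matchRuns ((cs.filter (fun c => PySem.Chars.isalpha c)).drop i) w.toList))) := by
  have hif : ∀ c : Bool, (if c = true then true else false) = c := fun c => by cases c <;> rfl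
  have hB : ∀ f : List Char,
      (["help", "asap", "urgent"].any (fun w => matchRuns f w.toList))
      = (matchRuns f "help".toList || matchRuns f "asap".toList || matchRuns f "urgent".toList) := by
    intro f
    simp [List.any_cons, List.any_nil, Bool.or_assoc]
  rw [hif, Bool.eq_iff_iff]
  simp only [hB]
  simp only [List.any_eq_true, List.mem_range, Nat.lt_succ_iff, Bool.or_eq_true, bne_iff_ne, ne_eq]
  simp only [← ne_eq, PySem.Chars.find_ne_neg_one_iff, infix_col_iff]
  constructor
  · rintro ((⟨i, hi, hm⟩ | ⟨i, hi, hm⟩) | ⟨i, hi, hm⟩)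
    exacts [⟨i, hi, Or.inl (Or.inl hm)⟩, ⟨i, hi, Or.inl (Or.inr hm)⟩, ⟨i, hi, Or.inr hm⟩]
  · rintro ⟨i, hi, (hm | hm) | hm⟩
    exacts [Or.inl (Or.inl ⟨i, hi, hm⟩), Or.inl (Or.inr ⟨i, hi, hm⟩), Or.inr ⟨i, hi, hm⟩]

-- ===== VERDICT (by name: the statement is the Claim_ definition above) =====
theorem is_stressful_spec : Claim_equal_is_stressful := by
  intro subj _
  unfold Spec_is_stressful is_stressful is_stressful_alt
  rw [guard_eq]
  cases h1 : PySem.Str.endswith subj "!!!" with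
  | true => simp
  | false =>
    cases h2 : pyStrIsupper subj with
    | true => simp
    | false =>
      simp only [Bool.false_or, Bool.false_eq_true, if_false]
      rw [aLoop_eq]
      exact branch_eq (PySem.Str.lower subj).toList
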